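-- pv_equiv track=rewrite | github.com/himanshu2801/leetcode_codes | 504.Base 7.py | convertToBase7
-- ===== SOURCE A (Python) =====
-- def convertToBase7(n: int) -> str:
--     if n>0:
--         i=1
--         s=0
--         while(n!=0):
--             r=n%7
--             n=n//7
--             s=s+(r*i)
--             i=i*10
--         return(str(s))
--     elif n==0:
--         return("0")
--     else:
--         n=-1*n
--         i=1
--         s=0
--         while(n!=0):
--             r=n%7
--             n=n//7
--             s=s+(r*i)
--             i=i*10
--         return("-"+str(s))
-- ===== SOURCE B (Python) =====
-- def convertToBase7(n: int) -> str:
--     if 0 <= n < 7: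
--         return str(n)
--     if n < 0:
--         return "-" + convertToBase7(-n)
--     return convertToBase7(n // 7) + str(n % 7)
-- ===== Notes on version B (the rewrite author's own statement) =====
-- stated objective: idiomatic
-- what changed: Replaces A's iterative trick of packing base-7 digits into a decimal integer (s += r*i; i *= 10) and then calling str(s) by the textbook recursion that builds the base-7 string directly: str(n) for 0<=n<7, '-' + convert(-n) for negatives, convert(n//7) + str(n%7) otherwise.
import Mathlib
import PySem

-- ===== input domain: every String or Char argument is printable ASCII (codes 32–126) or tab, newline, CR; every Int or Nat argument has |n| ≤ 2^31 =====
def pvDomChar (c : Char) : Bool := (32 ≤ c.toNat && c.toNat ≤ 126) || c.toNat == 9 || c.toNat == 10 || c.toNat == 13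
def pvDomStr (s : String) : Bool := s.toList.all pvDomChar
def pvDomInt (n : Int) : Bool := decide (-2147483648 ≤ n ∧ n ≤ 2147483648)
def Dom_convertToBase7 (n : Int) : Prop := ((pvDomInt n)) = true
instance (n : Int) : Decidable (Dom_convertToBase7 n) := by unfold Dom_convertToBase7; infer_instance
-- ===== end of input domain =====

-- B replaces A's digits-packed-into-a-decimal-integer while loop by the textbook recursion
-- on n // 7 building the base-7 string directly (objective: simpler/idiomatic; same cost).

-- ===== PORT A =====
-- A's while loop: r = n % 7; n = n // 7; s = s + r*i; i = i*10.  The loop is only ever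
-- entered with n > 0, so the 'n ≤ 0' stop (vs Python's 'n != 0') only makes the recursion
-- total; on every reachable state it is the same test.
def convertToBase7.loopA (n s i : Int) : Int :=
  if h : n ≤ 0 then s
  else convertToBase7.loopA (PySem.Int.floordiv n 7) (s + PySem.Int.mod n 7 * i) (i * 10)
termination_by n.toNat
decreasing_by
  rw [PySem.Int.floordiv_eq_ediv_of_pos (by omega : (0:Int) < 7)]
  omega

def convertToBase7 (n : Int) : String :=
  if n > 0 then
    PySem.Int.toStr (convertToBase7.loopA n 0 1)
  else if n = 0 then
    "0"
  else
    "-" ++ PySem.Int.toStr (convertToBase7.loopA (-1 * n) 0 1)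

-- ===== PORT B =====
def convertToBase7_alt (n : Int) : String :=
  if _h : 0 ≤ n ∧ n < 7 then PySem.Int.toStr n
  else if _hn : n < 0 then "-" ++ convertToBase7_alt (-n)
  else convertToBase7_alt (PySem.Int.floordiv n 7) ++ PySem.Int.toStr (PySem.Int.mod n 7)
termination_by n.natAbs * 2 + (if n < 0 then 1 else 0)
decreasing_by
  · simp only [Int.natAbs_neg]; split_ifs <;> omega
  · rw [PySem.Int.floordiv_eq_ediv_of_pos (by omega : (0:Int) < 7)]
    split_ifs <;> omega

-- ===== PRECONDITION & SPEC =====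
def Spec_convertToBase7 (n : Int) (out : String) : Prop := out = convertToBase7_alt n
instance (n : Int) (out : String) : Decidable (Spec_convertToBase7 n out) := by unfold Spec_convertToBase7; infer_instance

-- ===== CLAIM (what is proved, stated in full; the proofs are below) =====
def Claim_equal_convertToBase7 : Prop := ∀ (n : Int), Dom_convertToBase7 n → Spec_convertToBase7 n (convertToBase7 n)

-- ===== LEMMAS AND PROOFS =====

-- decimal digit characters of n (n > 0: no leading zeros; rep 0 = ['0'])
def pvRep (n : Nat) : List Char :=
  if n < 10 then [Nat.digitChar n]
  else pvRep (n / 10) ++ [Nat.digitChar (n % 10)]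
termination_by n
decreasing_by exact Nat.div_lt_self (by omega) (by omega)

-- base-7 digit characters of n
def pvRep7 (n : Nat) : List Char :=
  if n < 7 then [Nat.digitChar n]
  else pvRep7 (n / 7) ++ [Nat.digitChar (n % 7)]
termination_by n
decreasing_by exact Nat.div_lt_self (by omega) (by omega)

-- the base-7 digits of n packed as a decimal number (the value A's loop builds)
def pvVal7 (n : Nat) : Nat :=
  if n = 0 then 0 else pvVal7 (n / 7) * 10 + n % 7
termination_by n
decreasing_by exact Nat.div_lt_self (by omega) (by omega)

theorem pvToDigitsCore_eq (n : Nat) : ∀ (f : Nat) (l : List Char), n < f →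
    Nat.toDigitsCore 10 f n l = pvRep n ++ l := by
  induction n using Nat.strong_induction_on with
  | _ n ih =>
    intro f l hf
    obtain ⟨f', rfl⟩ : ∃ f', f = f' + 1 := ⟨f - 1, by omega⟩
    by_cases h10 : n < 10
    · have hz : n / 10 = 0 := Nat.div_eq_of_lt h10
      rw [Nat.toDigitsCore, pvRep]
      simp [hz, h10, Nat.mod_eq_of_lt h10]
    · have hdlt : n / 10 < n := Nat.div_lt_self (by omega) (by omega)
      rw [Nat.toDigitsCore, pvRep]
      have hz : ¬ n / 10 = 0 := by
        intro h; have := Nat.lt_of_div_eq_zero (by omega) h; omega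
      simp only [hz, h10, if_false]
      rw [ih (n / 10) hdlt f' _ (by omega)]
      simp

theorem pvToDigits_eq_rep (n : Nat) : Nat.toDigits 10 n = pvRep n := by
  rw [Nat.toDigits, pvToDigitsCore_eq n (n + 1) [] (by omega)]; simp

theorem pvToChars_nonneg (n : Int) (h : 0 ≤ n) :
    PySem.Int.toChars n = pvRep n.toNat := by
  rw [PySem.Int.toChars, if_neg (by omega), pvToDigits_eq_rep]

theorem pvVal7_pos (n : Nat) (h : 0 < n) : 0 < pvVal7 n := by
  induction n using Nat.strong_induction_on with
  | _ n ih =>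
    rw [pvVal7, if_neg (by omega)]
    by_cases h7 : n % 7 = 0
    · have hd : 0 < n / 7 := Nat.div_pos (by omega) (by omega)
      have := ih (n / 7) (Nat.div_lt_self (by omega) (by omega)) hd
      omega
    · omega

theorem pvRep_ten_mul (a d : Nat) (ha : 0 < a) (hd : d < 10) :
    pvRep (10 * a + d) = pvRep a ++ [Nat.digitChar d] := by
  rw [pvRep]
  have h1 : ¬ 10 * a + d < 10 := by omega
  have h2 : (10 * a + d) / 10 = a := by omega
  have h3 : (10 * a + d) % 10 = d := by omega
  simp [h1, h2, h3]

theorem pvRep_val7 (n : Nat) (h : 0 < n) : pvRep (pvVal7 n) = pvRep7 n := by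
  induction n using Nat.strong_induction_on with
  | _ n ih =>
    rw [pvVal7, if_neg (by omega), pvRep7]
    by_cases h7 : n < 7
    · have hz : n / 7 = 0 := Nat.div_eq_of_lt h7
      have h0 : pvVal7 0 = 0 := by simp [pvVal7]
      rw [if_pos h7, hz, h0, Nat.mod_eq_of_lt h7, Nat.zero_mul, Nat.zero_add,
        pvRep, if_pos (by omega : n < 10)]
    · have hd : 0 < n / 7 := Nat.div_pos (by omega) (by omega)
      rw [if_neg h7, Nat.mul_comm,
        pvRep_ten_mul (pvVal7 (n / 7)) (n % 7) (pvVal7_pos _ hd) (by omega),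
        ih (n / 7) (Nat.div_lt_self (by omega) (by omega)) hd]

theorem pvLoopA_eq (n : Nat) : ∀ (s i : Int),
    convertToBase7.loopA (n : Int) s i = s + (pvVal7 n : Int) * i := by
  induction n using Nat.strong_induction_on with
  | _ n ih =>
    intro s i
    rw [convertToBase7.loopA]
    by_cases h : n = 0
    · subst h; simp [pvVal7]
    · rw [dif_neg (by omega)]
      rw [PySem.Int.floordiv_eq_ediv_of_pos (by omega : (0:Int) < 7),
        PySem.Int.mod_eq_emod_of_pos (by omega : (0:Int) < 7),
        (by omega : ((n:Int)) / 7 = ((n / 7 : Nat) : Int)),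
        (by omega : ((n:Int)) % 7 = ((n % 7 : Nat) : Int))]
      rw [ih (n / 7) (Nat.div_lt_self (by omega) (by omega))]
      conv_rhs => rw [pvVal7]
      rw [if_neg h]
      push_cast
      ring

theorem pvAlt_toList (n : Nat) (h : 0 < n) :
    (convertToBase7_alt (n : Int)).toList = pvRep7 n := by
  induction n using Nat.strong_induction_on with
  | _ n ih =>
    rw [convertToBase7_alt, pvRep7]
    by_cases h7 : n < 7
    · rw [dif_pos (show (0:Int) ≤ (n:Int) ∧ (n:Int) < 7 by constructor <;> [omega; exact_mod_cast h7]),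
        if_pos h7]
      rw [PySem.Int.toStr, String.toList_ofList, pvToChars_nonneg _ (by omega),
        Int.toNat_natCast, pvRep, if_pos (by omega : n < 10)]
    · have hd : 0 < n / 7 := Nat.div_pos (by omega) (by omega)
      rw [dif_neg (by omega), dif_neg (by omega), if_neg h7]
      rw [PySem.Int.floordiv_eq_ediv_of_pos (by omega : (0:Int) < 7),
        PySem.Int.mod_eq_emod_of_pos (by omega : (0:Int) < 7),
        (by omega : ((n:Int)) / 7 = ((n / 7 : Nat) : Int)),
        (by omega : ((n:Int)) % 7 = ((n % 7 : Nat) : Int))]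
      rw [String.toList_append, ih (n / 7) (Nat.div_lt_self (by omega) (by omega)) hd]
      rw [PySem.Int.toStr, String.toList_ofList, pvToChars_nonneg _ (by omega),
        Int.toNat_natCast, pvRep, if_pos (by omega : n % 7 < 10)]

theorem pvPos_case (n : Int) (h : 0 < n) : convertToBase7 n = convertToBase7_alt n := by
  obtain ⟨m, rfl⟩ : ∃ m : Nat, n = (m : Int) := ⟨n.toNat, by omega⟩
  have hm : 0 < m := by exact_mod_cast h
  rw [convertToBase7, if_pos h, pvLoopA_eq]
  apply String.toList_inj.mp
  rw [pvAlt_toList m hm, PySem.Int.toStr, String.toList_ofList]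
  rw [show (0 : Int) + (pvVal7 m : Int) * 1 = ((pvVal7 m : Nat) : Int) by ring]
  rw [pvToChars_nonneg _ (by omega), Int.toNat_natCast, pvRep_val7 m hm]

-- ===== VERDICT (by name: the statement is the Claim_ definition above) =====
theorem convertToBase7_spec : Claim_equal_convertToBase7 := by
  unfold Claim_equal_convertToBase7
  intro n _
  unfold Spec_convertToBase7
  rcases lt_trichotomy n 0 with hneg | rfl | hpos
  · rw [convertToBase7, if_neg (by omega), if_neg (by omega)]
    rw [convertToBase7_alt, dif_neg (by omega), dif_pos hneg]
    have : convertToBase7 (-n) = convertToBase7_alt (-n) := pvPos_case (-n) (by omega)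
    rw [convertToBase7, if_pos (by omega : 0 < -n)] at this
    rw [← this, show (-1 * n) = -n by ring]
  · rw [convertToBase7, if_neg (by omega), if_pos rfl, convertToBase7_alt,
      dif_pos (by constructor <;> omega)]
    rfl
  · exact pvPos_case n hpos
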